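-- pv_equiv track=rewrite | github.com/lsinfo3/lora_graph_gw | Pre_Study/Placement_Betweenness_Centrality.py | create_shortest_paths
-- ===== SOURCE A (Python) =====
-- def create_shortest_paths(start_node,nodes,predecessor):
--     paths=[]
--     for v in range(start_node,len(nodes)):
--         u=v
--         currpath=[]
--         currpath.append(u)
--         while(predecessor[u]!=-1):
--             u=predecessor[u]
--             currpath.append(u)
--         paths.append(currpath)
--     return paths
-- ===== SOURCE B (Python) =====
-- def create_shortest_paths(start_node, nodes, predecessor):
--     # Iterative suffix-sharing: descend the predecessor chain pushing unresolved
--     # nodes on a stack until a memoized node or a root (-1) is found, then pop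
--     # the stack building each path back-to-front and memoizing every suffix.
--     memo = {}
--     paths = []
--     for v in range(start_node, len(nodes)):
--         stack = []
--         u = v
--         while True:
--             cached = memo.get(u)
--             if cached is not None:
--                 path = cached
--                 break
--             p = predecessor[u]
--             if p == -1:
--                 path = [u]
--                 memo[u] = path
--                 break
--             stack.append(u)
--             u = p
--         while stack:
--             u = stack.pop()
--             path = [u] + path
--             memo[u] = path
--         paths.append(path)
--     return paths
-- ===== Notes on version B (the rewrite author's own statement) =====
-- stated objective: alternative
-- what changed: A re-walks the full predecessor chain for every node with an inner while-loop; B descends each chain only until it meets a memoized node or the root, pushing nodes on an explicit stack, then pops the stack building each path back-to-front and memoizing every suffix so shared chain suffixes are computed once.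
import Mathlib
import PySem

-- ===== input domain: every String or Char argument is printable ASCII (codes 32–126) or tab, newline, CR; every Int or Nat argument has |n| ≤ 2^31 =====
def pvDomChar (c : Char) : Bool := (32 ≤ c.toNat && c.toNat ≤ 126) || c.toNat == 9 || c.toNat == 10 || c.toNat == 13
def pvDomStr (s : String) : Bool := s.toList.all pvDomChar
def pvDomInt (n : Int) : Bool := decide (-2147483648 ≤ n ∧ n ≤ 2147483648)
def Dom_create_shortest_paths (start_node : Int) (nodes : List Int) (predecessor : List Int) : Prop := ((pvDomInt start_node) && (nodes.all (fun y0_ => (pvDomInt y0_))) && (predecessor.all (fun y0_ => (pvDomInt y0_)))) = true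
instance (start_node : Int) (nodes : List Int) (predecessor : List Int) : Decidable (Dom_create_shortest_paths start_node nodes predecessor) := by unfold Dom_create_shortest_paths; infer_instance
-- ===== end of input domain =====

-- B replaces A's per-node full re-walk of the predecessor chain by an iterative
-- stack-and-memo scheme that builds each path back-to-front and reuses memoized
-- suffix paths (objective: alternative decomposition; no speed claim).

-- ===== PORT A =====
-- A's inner while-loop. The fuel only makes the loop total: inside Pre_ every chain
-- reaches -1 within 2*len(predecessor) steps, so fuel 2*len+1 is never exhausted;
-- the `none` branch (Python IndexError) is likewise unreachable inside Pre_.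
def pvWalk (pred : List Int) : Nat → Int → List Int → List Int
  | 0, _, acc => acc
  | f+1, u, acc =>
    match PySem.List.pyGet? pred u with
    | none => acc
    | some p => if p = -1 then acc else pvWalk pred f p (acc ++ [p])

def create_shortest_paths (start_node : Int) (nodes : List Int) (predecessor : List Int) : List (List Int) :=
  (PySem.List.pyRange start_node (nodes.length : Int) 1).foldl
    (fun paths v => paths ++ [pvWalk predecessor (2 * predecessor.length + 1) v [v]]) []

-- ===== PORT B =====
-- B's descending while-loop: push unresolved nodes on the stack until a memoized
-- node or a root (-1); fuel again only for totality, none-branch unreachable in Pre_.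
-- Returns (stack, path, memo).
def pvDescend (pred : List Int) :
    Nat → Int → List Int → PySem.Dict Int (List Int) →
      List Int × List Int × PySem.Dict Int (List Int)
  | 0, _, st, m => (st, [], m)
  | f+1, u, st, m =>
    match m.get? u with
    | some cached => (st, cached, m)
    | none =>
      match PySem.List.pyGet? pred u with
      | none => (st, [], m)
      | some p =>
        if p = -1 then (st, [u], m.insert u [u])
        else pvDescend pred f p (st ++ [u]) m

-- B's ascending while-loop "while stack: u = stack.pop(); path = [u] + path; memo[u] = path"
-- (pop from the end = right fold over the stack).
def pvAscend (st : List Int) (path : List Int) (m : PySem.Dict Int (List Int)) :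
    List Int × PySem.Dict Int (List Int) :=
  st.foldr (fun u acc => (u :: acc.1, acc.2.insert u (u :: acc.1))) (path, m)

def create_shortest_paths_alt (start_node : Int) (nodes : List Int) (predecessor : List Int) : List (List Int) :=
  ((PySem.List.pyRange start_node (nodes.length : Int) 1).foldl
    (fun st v =>
      let d := pvDescend predecessor (2 * predecessor.length + 1) v [] st.2
      let r := pvAscend d.1 d.2.1 d.2.2
      (st.1 ++ [r.1], r.2))
    (([] : List (List Int)), (PySem.Dict.empty : PySem.Dict Int (List Int)))).1

-- ===== PRECONDITION & SPEC =====
-- k-fold iteration of the predecessor map (Python indexing, negative indices wrap).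
def pvIter (pred : List Int) : Nat → Int → Option Int
  | 0, u => some u
  | k+1, u => (PySem.List.pyGet? pred u).bind (pvIter pred k)

-- Pre_ holds exactly when either the range is empty, or every node of
-- range(start_node, len(nodes)) is an in-bounds index whose predecessor chain
-- reaches the root marker -1 (all indices along it in bounds, no cycle) —
-- precisely the inputs on which Python A returns; elsewhere A raises IndexError
-- or loops forever.  The two bound conjuncts are implied by the chain condition
-- (every listed node is indexed) and only keep the quantifier range small; the
-- bound 2*len(predecessor) is the pigeonhole bound on a terminating chain
-- (distinct in-bounds indices), not a size restriction.
def Pre_create_shortest_paths (start_node : Int) (nodes : List Int) (predecessor : List Int) : Prop :=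
  (nodes.length : Int) ≤ start_node ∨
    (-(predecessor.length : Int) ≤ start_node ∧ nodes.length ≤ predecessor.length ∧
      ∀ v ∈ PySem.List.pyRange start_node (nodes.length : Int) 1,
        ∃ k < 2 * predecessor.length + 1, 1 ≤ k ∧ pvIter predecessor k v = some (-1))
instance (start_node : Int) (nodes : List Int) (predecessor : List Int) : Decidable (Pre_create_shortest_paths start_node nodes predecessor) := by unfold Pre_create_shortest_paths; infer_instance

def pvWitness_create_shortest_paths : Int × List Int × List Int := (0, [10, 20, 30], [-1, 0, 1])

def Spec_create_shortest_paths (start_node : Int) (nodes : List Int) (predecessor : List Int) (out : List (List Int)) : Prop := out = create_shortest_paths_alt start_node nodes predecessor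
instance (start_node : Int) (nodes : List Int) (predecessor : List Int) (out : List (List Int)) : Decidable (Spec_create_shortest_paths start_node nodes predecessor out) := by unfold Spec_create_shortest_paths; infer_instance

-- ===== CLAIM (what is proved, stated in full; the proofs are below) =====
def Claim_equal_create_shortest_paths : Prop := ∀ (start_node : Int) (nodes : List Int) (predecessor : List Int), Dom_create_shortest_paths start_node nodes predecessor → Pre_create_shortest_paths start_node nodes predecessor → Spec_create_shortest_paths start_node nodes predecessor (create_shortest_paths start_node nodes predecessor)

-- ===== LEMMAS AND PROOFS =====

-- the true chain from u, fuel-indexed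
def pvChain (pred : List Int) : Nat → Int → List Int
  | 0, u => [u]
  | f+1, u =>
    match PySem.List.pyGet? pred u with
    | none => [u]
    | some p => if p = -1 then [u] else u :: pvChain pred f p

theorem pvChain_head (pred : List Int) (f : Nat) (u : Int) :
    pvChain pred f u = u :: (pvChain pred f u).tail := by
  cases f with
  | zero => rfl
  | succ f =>
    simp only [pvChain]
    rcases h : PySem.List.pyGet? pred u with _ | p
    · rfl
    · by_cases hp : p = -1 <;> simp [hp]

theorem pvChain_congr (pred : List Int) :
    ∀ (k : Nat), 1 ≤ k → ∀ (u : Int), pvIter pred k u = some (-1) →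
      ∀ (f g : Nat), k - 1 ≤ f → k - 1 ≤ g → pvChain pred f u = pvChain pred g u := by
  intro k
  induction k with
  | zero => omega
  | succ k ih =>
    intro _ u hit f g hf hg
    simp only [pvIter] at hit
    rcases hstep : PySem.List.pyGet? pred u with _ | p
    · rw [hstep] at hit; simp at hit
    · rw [hstep] at hit; simp only [Option.bind_some] at hit
      by_cases hp : p = -1
      · cases f with
        | zero => cases g with
          | zero => rfl
          | succ g => simp [pvChain, hstep, hp]
        | succ f => cases g with
          | zero => simp [pvChain, hstep, hp]
          | succ g => simp [pvChain, hstep, hp]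
      · have hk1 : 1 ≤ k := by
          cases k with
          | zero => simp [pvIter] at hit; exact absurd hit hp
          | succ k => omega
        obtain ⟨f', rfl⟩ : ∃ f', f = f' + 1 := ⟨f - 1, by omega⟩
        obtain ⟨g', rfl⟩ : ∃ g', g = g' + 1 := ⟨g - 1, by omega⟩
        simp only [pvChain, hstep, if_neg hp]
        rw [ih hk1 p hit f' g' (by omega) (by omega)]

theorem pvWalk_eq (pred : List Int) :
    ∀ (k : Nat), 1 ≤ k → ∀ (u : Int), pvIter pred k u = some (-1) →
      ∀ (f : Nat), k ≤ f → ∀ (acc : List Int),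
        pvWalk pred f u acc = acc ++ (pvChain pred f u).tail := by
  intro k
  induction k with
  | zero => omega
  | succ k ih =>
    intro _ u hit f hf acc
    simp only [pvIter] at hit
    obtain ⟨f', rfl⟩ : ∃ f', f = f' + 1 := ⟨f - 1, by omega⟩
    rcases hstep : PySem.List.pyGet? pred u with _ | p
    · rw [hstep] at hit; simp at hit
    · rw [hstep] at hit; simp only [Option.bind_some] at hit
      by_cases hp : p = -1
      · simp [pvWalk, pvChain, hstep, hp]
      · have hk1 : 1 ≤ k := by
          cases k with
          | zero => simp [pvIter] at hit; exact absurd hit hp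
          | succ k => omega
        simp only [pvWalk, pvChain, hstep, if_neg hp]
        rw [ih hk1 p hit f' (by omega) (acc ++ [p])]
        rw [pvChain_head pred f' p]
        simp

-- memo invariant: every cached entry is the true chain of its key, and the key's chain terminates
def pvInv (pred : List Int) (m : PySem.Dict Int (List Int)) : Prop :=
  ∀ x l, m.get? x = some l →
    (∃ k, 1 ≤ k ∧ k ≤ 2 * pred.length ∧ pvIter pred k x = some (-1)) ∧
      l = pvChain pred (2 * pred.length + 1) x

theorem pvDescendAscend_eq (pred : List Int) :
    ∀ (k : Nat), 1 ≤ k → k ≤ 2 * pred.length → ∀ (u : Int), pvIter pred k u = some (-1) →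
      ∀ (f : Nat), k ≤ f → ∀ (st : List Int) (m : PySem.Dict Int (List Int)), pvInv pred m →
        ∃ σ pw m₁, pvDescend pred f u st m = (st ++ σ, pw, m₁) ∧ pvInv pred m₁ ∧
          (pvAscend σ pw m₁).1 = pvChain pred (2 * pred.length + 1) u ∧
            pvInv pred (pvAscend σ pw m₁).2 := by
  intro k
  induction k with
  | zero => omega
  | succ k ih =>
    intro _ hkL u hit f hf st m hInv
    simp only [pvIter] at hit
    obtain ⟨f', rfl⟩ : ∃ f', f = f' + 1 := ⟨f - 1, by omega⟩
    rcases hm : m.get? u with _ | cached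
    · rcases hstep : PySem.List.pyGet? pred u with _ | p
      · rw [hstep] at hit; simp at hit
      · rw [hstep] at hit; simp only [Option.bind_some] at hit
        by_cases hp : p = -1
        · -- root: push nothing, path = [u], memo u ↦ [u]
          have hchain : pvChain pred (2 * pred.length + 1) u = [u] := by
            simp [pvChain, hstep, hp]
          have hInv' : pvInv pred (m.insert u [u]) := by
            intro x l hx
            rw [PySem.Dict.get?_insert] at hx
            split at hx
            · cases hx; subst ‹x = u›
              exact ⟨⟨k + 1, by omega, hkL, by simp [pvIter, hstep, Option.bind_some, hit]⟩, hchain.symm⟩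
            · exact hInv x l hx
          refine ⟨[], [u], m.insert u [u], ?_, hInv', ?_, hInv'⟩
          · simp [pvDescend, hm, hstep, hp]
          · simpa [pvAscend] using hchain.symm
        · have hk1 : 1 ≤ k := by
            cases k with
            | zero => simp [pvIter] at hit; exact absurd hit hp
            | succ k => omega
          obtain ⟨σ', pw, m₁, hdesc, hInv₁, hasc1, hasc2⟩ :=
            ih hk1 (by omega) p hit f' (by omega) (st ++ [u]) m hInv
          refine ⟨[u] ++ σ', pw, m₁, ?_, hInv₁, ?_, ?_⟩
          · simp only [pvDescend, hm, hstep, if_neg hp]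
            rw [hdesc]; simp
          all_goals {
            have hfold : pvAscend ([u] ++ σ') pw m₁ =
                (u :: (pvAscend σ' pw m₁).1,
                  (pvAscend σ' pw m₁).2.insert u (u :: (pvAscend σ' pw m₁).1)) := by
              simp [pvAscend]
            have hstep1 : pvChain pred (2 * pred.length + 1) u
                = u :: pvChain pred (2 * pred.length) p := by
              conv_lhs => rw [pvChain]
              simp [hstep, hp]
            have hchain : u :: (pvAscend σ' pw m₁).1 = pvChain pred (2 * pred.length + 1) u := by
              rw [hasc1,
                pvChain_congr pred k hk1 p hit (2 * pred.length + 1) (2 * pred.length)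
                  (by omega) (by omega), hstep1]
            first
            | (rw [hfold]; exact hchain)
            | (rw [hfold]
               intro x l hx
               rw [PySem.Dict.get?_insert] at hx
               split at hx
               · cases hx; subst ‹x = u›
                 exact ⟨⟨k + 1, by omega, hkL, by simp [pvIter, hstep, Option.bind_some, hit]⟩,
                   hchain⟩
               · exact hasc2 x l hx)
          }
    · -- cache hit: stack unchanged, path = cached
      obtain ⟨_, hcached⟩ := hInv u cached hm
      refine ⟨[], cached, m, ?_, hInv, ?_, hInv⟩
      · simp [pvDescend, hm]
      · simpa [pvAscend] using hcached

theorem pvFoldA (pred : List Int) (F : Nat) :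
    ∀ (xs : List Int) (acc : List (List Int)),
      (∀ v ∈ xs, pvWalk pred F v [v] = pvChain pred F v) →
      xs.foldl (fun paths v => paths ++ [pvWalk pred F v [v]]) acc
        = acc ++ xs.map (pvChain pred F) := by
  intro xs
  induction xs with
  | nil => intro acc _; simp
  | cons v xs ih =>
    intro acc hmem
    simp only [List.foldl_cons, List.map_cons]
    rw [ih _ (fun w hw => hmem w (List.mem_cons_of_mem _ hw)),
      hmem v (List.mem_cons_self ..)]
    simp

theorem pvFoldB (pred : List Int) :
    ∀ (xs : List Int) (acc : List (List Int)) (m : PySem.Dict Int (List Int)),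
      pvInv pred m →
      (∀ v ∈ xs, ∃ k, 1 ≤ k ∧ k ≤ 2 * pred.length ∧ pvIter pred k v = some (-1)) →
      (xs.foldl (fun st v =>
          let d := pvDescend pred (2 * pred.length + 1) v [] st.2
          let r := pvAscend d.1 d.2.1 d.2.2
          (st.1 ++ [r.1], r.2)) (acc, m)).1
        = acc ++ xs.map (pvChain pred (2 * pred.length + 1)) := by
  intro xs
  induction xs with
  | nil => intro acc m _ _; simp
  | cons v xs ih =>
    intro acc m hInv hmem
    obtain ⟨k, hk1, hkL, hit⟩ := hmem v (List.mem_cons_self ..)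
    obtain ⟨σ, pw, m₁, hdesc, hInv₁, hasc1, hasc2⟩ :=
      pvDescendAscend_eq pred k hk1 hkL v hit (2 * pred.length + 1) (by omega) [] m hInv
    simp only [List.foldl_cons, List.map_cons]
    rw [hdesc] at *
    simp only [List.nil_append] at *
    rw [ih _ _ hasc2 (fun w hw => hmem w (List.mem_cons_of_mem _ hw)), hasc1]
    simp

-- ===== VERDICT (by name: the statement is the Claim_ definition above) =====
theorem create_shortest_paths_spec : Claim_equal_create_shortest_paths := by
  intro start_node nodes predecessor _hdom hpre
  unfold Spec_create_shortest_paths create_shortest_paths create_shortest_paths_alt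
  rcases hpre with hend | ⟨_, _, hpre⟩
  · rw [PySem.List.pyRange_one_eq_nil hend]
    rfl
  have hmem : ∀ v ∈ PySem.List.pyRange start_node (nodes.length : Int) 1,
      ∃ k, 1 ≤ k ∧ k ≤ 2 * predecessor.length ∧ pvIter predecessor k v = some (-1) := by
    intro v hv
    obtain ⟨k, hk, hk1, hit⟩ := hpre v hv
    exact ⟨k, hk1, by omega, hit⟩
  have hwalk : ∀ v ∈ PySem.List.pyRange start_node (nodes.length : Int) 1,
      pvWalk predecessor (2 * predecessor.length + 1) v [v]
        = pvChain predecessor (2 * predecessor.length + 1) v := by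
    intro v hv
    obtain ⟨k, hk1, hkL, hit⟩ := hmem v hv
    rw [pvWalk_eq predecessor k hk1 v hit _ (by omega)]
    rw [pvChain_head predecessor (2 * predecessor.length + 1) v]
    simp
  rw [pvFoldA predecessor _ _ _ hwalk,
    pvFoldB predecessor _ _ _ (fun x l hx => by
      rw [PySem.Dict.get?_empty] at hx; cases hx) hmem]
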